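-- pv_equiv track=rewrite | github.com/Spaceglidemasta/uni | semester4/it_sec/ex2/challange.py | alicnbob
-- ===== SOURCE A (Python) =====
-- def alicnbob(ptext:str) -> str:
--
--     out = ""
--
--     for i in range(0, len(ptext), 4):
--         block = ptext[i:i+4]
--
--         if len(block) < 4:
--             out += block
--         else:
--             out += block[2] + block[0] + block[3] + block[1]
--
--
--     return out
-- ===== SOURCE B (Python) =====
-- PERM = [2, 0, 3, 1]
--
--
-- def alicnbob(ptext: str) -> str:
--     n = len(ptext) - len(ptext) % 4
--     head = ''.join(ptext[i - i % 4 + PERM[i % 4]] for i in range(n))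
--     return head + ptext[n:]
-- ===== Notes on version B (the rewrite author's own statement) =====
-- stated objective: alternative
-- what changed: A concatenates rearranged 4-char block slices in a step-4 loop; B makes a single pass over character positions of the full-block prefix, reading each output character via the closed-form source index i - i%4 + PERM[i%4], then appends the sub-4 tail.
import Mathlib
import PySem

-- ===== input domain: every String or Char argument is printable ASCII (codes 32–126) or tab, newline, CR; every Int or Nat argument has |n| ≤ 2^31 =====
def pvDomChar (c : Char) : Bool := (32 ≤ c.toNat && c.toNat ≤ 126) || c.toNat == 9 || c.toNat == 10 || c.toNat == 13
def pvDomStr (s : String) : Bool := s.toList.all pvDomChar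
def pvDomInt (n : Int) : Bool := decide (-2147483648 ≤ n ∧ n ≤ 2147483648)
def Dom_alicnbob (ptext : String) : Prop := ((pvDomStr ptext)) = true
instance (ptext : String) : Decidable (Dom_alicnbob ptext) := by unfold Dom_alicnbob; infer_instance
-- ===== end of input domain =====

-- B replaces A's block-by-block slicing loop with a single pass over character positions using a
-- closed-form index permutation (position i reads index i - i%4 + PERM[i%4]); objective: alternative.

-- ===== PORT A =====
-- the loop 'for i in range(0, len(ptext), 4)' as the obvious recursion consuming 4 chars per step;
-- block = ptext[i:i+4] is the take-4 of the remaining suffix.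
def alicnbobLoop (out : List Char) (l : List Char) : List Char :=
  if l = [] then out
  else
    let block := l.take 4
    if block.length < 4 then out ++ block
    else alicnbobLoop (out ++ [block[2]!, block[0]!, block[3]!, block[1]!]) (l.drop 4)
termination_by l.length
decreasing_by
  simp only [List.length_drop]
  rename_i h _
  have : l.length ≠ 0 := fun hl => h (List.eq_nil_of_length_eq_zero hl)
  omega

def alicnbob (ptext : String) : String :=
  String.ofList (alicnbobLoop [] ptext.toList)

-- ===== PORT B =====
def pvPerm : List Int := [2, 0, 3, 1]

def alicnbob_alt (ptext : String) : String :=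
  let l := ptext.toList
  let n : Int := (l.length : Int) - PySem.Int.mod (l.length : Int) 4
  let head := (PySem.List.pyRange 0 n 1).map
      (fun i => PySem.List.pyGetD l
        (i - PySem.Int.mod i 4 + PySem.List.pyGetD pvPerm (PySem.Int.mod i 4) 0) ' ')
  String.ofList (head ++ PySem.List.slice l (some n) none)

-- ===== PRECONDITION & SPEC =====
def Spec_alicnbob (ptext : String) (out : String) : Prop := out = alicnbob_alt ptext
instance (ptext : String) (out : String) : Decidable (Spec_alicnbob ptext out) := by unfold Spec_alicnbob; infer_instance

-- ===== CLAIM (what is proved, stated in full; the proofs are below) =====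
def Claim_equal_alicnbob : Prop := ∀ (ptext : String), Dom_alicnbob ptext → Spec_alicnbob ptext (alicnbob ptext)

-- ===== LEMMAS AND PROOFS =====

-- Nat-side reference: character k of the permuted full-block prefix
def gN (l : List Char) (k : Nat) : Char := l.getD (k - k % 4 + [2, 0, 3, 1].getD (k % 4) 0) ' '

lemma pvMod_natCast (k : Nat) : PySem.Int.mod (k : Int) 4 = ((k % 4 : Nat) : Int) := by
  simp [PySem.Int.mod, Int.fmod_eq_emod]

lemma gN_shift (a b c d : Char) (rest : List Char) (k : Nat) :
    gN (a::b::c::d::rest) (4 + k) = gN rest k := by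
  have h1 : (4 + k) % 4 = k % 4 := by omega
  unfold gN
  rw [h1]
  have h2 : 4 + k - k % 4 + [2,0,3,1].getD (k % 4) 0
      = (k - k % 4 + [2,0,3,1].getD (k % 4) 0) + 1 + 1 + 1 + 1 := by
    have := Nat.mod_le k 4
    omega
  rw [h2]
  simp only [List.getD_cons_succ]

lemma loop_append (n : Nat) : ∀ l : List Char, l.length ≤ n → ∀ out,
    alicnbobLoop out l = out ++ alicnbobLoop [] l := by
  induction n with
  | zero =>
      intro l hl out
      have : l = [] := by cases l <;> simp_all
      subst this
      rw [alicnbobLoop, alicnbobLoop]; simp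
  | succ n ih =>
      intro l hl out
      rw [alicnbobLoop, alicnbobLoop]
      by_cases h : l = []
      · simp [h]
      · simp only [h, if_false]
        by_cases hlt : l.length < 4
        · simp [List.length_take, hlt]
        · have hd : (l.drop 4).length ≤ n := by simp; omega
          simp only [List.length_take]
          rw [if_neg (by omega), if_neg (by omega)]
          conv_lhs => rw [ih (l.drop 4) hd]
          conv_rhs => rw [ih (l.drop 4) hd]
          simp

lemma loop_cons4 (a b c d : Char) (rest : List Char) :
    alicnbobLoop [] (a::b::c::d::rest) = [c, a, d, b] ++ alicnbobLoop [] rest := by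
  rw [alicnbobLoop]
  norm_num
  rw [loop_append rest.length rest le_rfl]
  simp

lemma key (n : Nat) : ∀ l : List Char, l.length ≤ n →
    alicnbobLoop [] l =
      (List.range (l.length - l.length % 4)).map (gN l) ++ l.drop (l.length - l.length % 4) := by
  induction n with
  | zero =>
      intro l hl
      have : l = [] := by cases l <;> simp_all
      subst this
      rw [alicnbobLoop]; simp
  | succ n ih =>
      intro l hl
      by_cases hs : l.length < 4
      · have hm : l.length % 4 = l.length := Nat.mod_eq_of_lt hs
        rw [alicnbobLoop]
        by_cases h : l = []
        · simp [h]
        · have hb : (l.take 4).length < 4 := by simp [List.length_take]; omega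
          simp [h, hm, List.take_of_length_le (le_of_lt hs)]
          intro h4
          exact absurd h4 (by omega)
      · rcases l with _ | ⟨a, _ | ⟨b, _ | ⟨c, _ | ⟨d, rest⟩⟩⟩⟩ <;> simp at hs
        have hr : rest.length ≤ n := by simp at hl ⊢; omega
        have hlen : (a::b::c::d::rest).length - (a::b::c::d::rest).length % 4
            = 4 + (rest.length - rest.length % 4) := by
          have := Nat.mod_le rest.length 4
          simp [Nat.add_mod]
          omega
        rw [loop_cons4, ih rest hr, hlen, List.range_add, List.map_append]
        have h4 : (List.range 4).map (gN (a::b::c::d::rest)) = [c, a, d, b] := by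
          simp [List.range_succ, gN]
        have hshift : ((List.range (rest.length - rest.length % 4)).map
              (fun k => 4 + k)).map (gN (a::b::c::d::rest))
            = (List.range (rest.length - rest.length % 4)).map (gN rest) := by
          rw [List.map_map]
          exact List.map_congr_left (fun k _ => by
            simp only [Function.comp_apply, gN_shift])
        have hdrop : (a::b::c::d::rest).drop (4 + (rest.length - rest.length % 4))
            = rest.drop (rest.length - rest.length % 4) := by
          rw [← List.drop_drop]
          rfl
        rw [h4, hshift, hdrop]
        simp

lemma perm_lookup (r : Nat) (h : r < 4) :
    PySem.List.pyGetD pvPerm ((r : Nat) : Int) 0 = (([2,0,3,1].getD r 0 : Nat) : Int) := by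
  interval_cases r <;> decide

lemma f_eq (l : List Char) (k : Nat) :
    PySem.List.pyGetD l
      ((k : Int) - PySem.Int.mod (k : Int) 4
        + PySem.List.pyGetD pvPerm (PySem.Int.mod (k : Int) 4) 0) ' ' = gN l k := by
  rw [pvMod_natCast, perm_lookup (k % 4) (Nat.mod_lt _ (by omega))]
  have h : (k : Int) - ((k % 4 : Nat) : Int) + (([2,0,3,1].getD (k % 4) 0 : Nat) : Int)
      = ((k - k % 4 + [2,0,3,1].getD (k % 4) 0 : Nat) : Int) := by
    have := Nat.mod_le k 4
    push_cast
    omega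
  rw [h, PySem.List.pyGetD_natCast]
  rfl

lemma alt_eq (l : List Char) :
    alicnbob_alt (String.ofList l) = String.ofList
      ((List.range (l.length - l.length % 4)).map (gN l) ++ l.drop (l.length - l.length % 4)) := by
  simp only [alicnbob_alt]
  have hto : (String.ofList l).toList = l := by simp
  rw [hto]
  have hn : (l.length : Int) - PySem.Int.mod (l.length : Int) 4
      = ((l.length - l.length % 4 : Nat) : Int) := by
    rw [pvMod_natCast]
    have := Nat.mod_le l.length 4
    push_cast
    omega
  rw [hn, PySem.List.pyRange_one, PySem.List.slice_from_natCast]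
  congr 1
  congr 1
  rw [Int.sub_zero, Int.toNat_natCast, List.map_map]
  exact List.map_congr_left (fun k _ => by
    simp only [Function.comp_apply, Int.zero_add]
    exact f_eq l k)

theorem alicnbob_spec : Claim_equal_alicnbob := by
  intro ptext _
  unfold Spec_alicnbob
  have h := alt_eq ptext.toList
  have hs : String.ofList ptext.toList = ptext := by simp
  rw [hs] at h
  rw [alicnbob, h, key ptext.toList.length ptext.toList le_rfl]
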